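-- pv_equiv track=rewrite | github.com/rafael5/vista-docs | src/vista_docs/enrich/inventory_fields.py | build_inventory_index
-- ===== SOURCE A (Python) =====
-- def build_inventory_index(rows: list[dict]) -> dict[tuple[str, str], dict]:
--     """
--     Build a lookup index from enriched inventory rows.
--
--     Key: (app_name_abbrev, doc_title)
--     Value: the best row for that document (DOCX preferred over PDF).
--     Noise rows (noise_type != '') are excluded.
--     """
--     index: dict[tuple[str, str], dict] = {}
--
--     for row in rows:
--         if row.get("noise_type", "") != "":
--             continue
--
--         key = (row["app_name_abbrev"], row["doc_title"])
--         existing = index.get(key)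
--
--         if existing is None:
--             index[key] = row
--         elif row.get("doc_format", "") == "docx":
--             # DOCX row takes precedence — replace any previously stored PDF row
--             index[key] = row
--
--     return index
-- ===== SOURCE B (Python) =====
-- def build_inventory_index(rows: list[dict]) -> dict[tuple[str, str], dict]:
--     """Group non-noise rows by (app_name_abbrev, doc_title), then pick per
--     group the last DOCX row, or the group's first row if it has no DOCX."""
--     groups: dict[tuple[str, str], list[dict]] = {}
--     for row in rows:
--         if row.get("noise_type", "") != "":
--             continue
--         key = (row["app_name_abbrev"], row["doc_title"])
--         groups.setdefault(key, []).append(row)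
--     return {
--         key: next((r for r in reversed(grp) if r.get("doc_format", "") == "docx"), grp[0])
--         for key, grp in groups.items()
--     }
-- ===== Notes on version B (the rewrite author's own statement) =====
-- stated objective: alternative
-- what changed: Replaces A's single-pass incremental keep-or-replace over a (key -> best row) dict with a two-phase group-then-reduce: one pass groups non-noise rows by (app_name_abbrev, doc_title), then each group is reduced to its last docx row (or its first row if none).
import Mathlib
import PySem

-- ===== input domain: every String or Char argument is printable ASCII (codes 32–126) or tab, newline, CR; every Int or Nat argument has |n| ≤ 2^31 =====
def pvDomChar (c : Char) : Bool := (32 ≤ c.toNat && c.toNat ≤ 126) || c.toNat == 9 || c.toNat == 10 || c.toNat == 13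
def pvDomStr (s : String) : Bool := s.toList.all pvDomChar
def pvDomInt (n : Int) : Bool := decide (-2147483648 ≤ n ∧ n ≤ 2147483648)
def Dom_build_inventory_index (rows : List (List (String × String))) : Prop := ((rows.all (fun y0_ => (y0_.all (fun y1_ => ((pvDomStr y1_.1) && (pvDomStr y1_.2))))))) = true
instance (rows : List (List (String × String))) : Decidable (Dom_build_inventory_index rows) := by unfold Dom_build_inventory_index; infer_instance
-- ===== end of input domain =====

-- B restructures A's single pass (keep first row, overwrite on a later docx row) as
-- group-by-key then reduce each group to "last docx row, else first row"; same values, same cost.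

-- A row is a dict; Python `row.get(k, d)`.
def pvRowGetD (row : List (String × String)) (k dflt : String) : String :=
  (PySem.Dict.mk row).getD k dflt

def pvRowGet? (row : List (String × String)) (k : String) : Option String :=
  (PySem.Dict.mk row).get? k

-- row.get("noise_type", "") != ""
def pvIsNoise (row : List (String × String)) : Bool :=
  pvRowGetD row "noise_type" "" != ""

-- (row["app_name_abbrev"], row["doc_title"]); a missing key raises KeyError in Python — excluded by Pre_
def pvKey (row : List (String × String)) : String × String :=
  (pvRowGetD row "app_name_abbrev" "", pvRowGetD row "doc_title" "")

-- row.get("doc_format", "") == "docx"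
def pvIsDocx (row : List (String × String)) : Bool :=
  pvRowGetD row "doc_format" "" == "docx"

-- ===== PORT A =====
-- the body of A's for-loop
def pvAStep (index : PySem.Dict (String × String) (List (String × String)))
    (row : List (String × String)) : PySem.Dict (String × String) (List (String × String)) :=
  if pvIsNoise row then index
  else
    let key := pvKey row
    match index.get? key with
    | none => index.insert key row
    | some _ => if pvIsDocx row then index.insert key row else index

-- a dict keyed by a 2-tuple is returned as the flattened triple list (type convention)
def build_inventory_index (rows : List (List (String × String))) : List (String × String × List (String × String)) :=
  (rows.foldl pvAStep PySem.Dict.empty).items.map (fun p => (p.1.1, p.1.2, p.2))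

-- ===== PORT B =====
-- groups.setdefault(key, []).append(row) == Dict.modify key [] (· ++ [row])
def pvGroupStep (groups : PySem.Dict (String × String) (List (List (String × String))))
    (row : List (String × String)) : PySem.Dict (String × String) (List (List (String × String))) :=
  if pvIsNoise row then groups
  else groups.modify (pvKey row) [] (· ++ [row])

-- next((r for r in reversed(grp) if r.get("doc_format","")=="docx"), grp[0]); grp is never []
def pvBest (grp : List (List (String × String))) : List (String × String) :=
  match grp.reverse.find? pvIsDocx with
  | some r => r
  | none => grp.headD []

-- the final dict comprehension over groups.items(); group keys are distinct, so it is a map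
def build_inventory_index_alt (rows : List (List (String × String))) : List (String × String × List (String × String)) :=
  ((rows.foldl pvGroupStep PySem.Dict.empty).items).map (fun kg => (kg.1.1, kg.1.2, pvBest kg.2))

-- ===== PRECONDITION & SPEC =====
-- Pre_ excludes exactly the inputs where Python A raises KeyError: some non-noise row
-- is missing "app_name_abbrev" or "doc_title" (B raises there too).
def Pre_build_inventory_index (rows : List (List (String × String))) : Prop :=
  ∀ row ∈ rows, pvRowGetD row "noise_type" "" = "" →
    (pvRowGet? row "app_name_abbrev").isSome ∧ (pvRowGet? row "doc_title").isSome

instance (rows : List (List (String × String))) : Decidable (Pre_build_inventory_index rows) := by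
  unfold Pre_build_inventory_index; infer_instance

def pvWitness_build_inventory_index : (List (List (String × String))) :=
  [[("app_name_abbrev", "app"), ("doc_title", "t"), ("doc_format", "pdf")],
   [("app_name_abbrev", "app"), ("doc_title", "t"), ("doc_format", "docx")],
   [("noise_type", "junk")]]

def Spec_build_inventory_index (rows : List (List (String × String))) (out : List (String × String × List (String × String))) : Prop := out = build_inventory_index_alt rows
instance (rows : List (List (String × String))) (out : List (String × String × List (String × String))) : Decidable (Spec_build_inventory_index rows out) := by unfold Spec_build_inventory_index; infer_instance

-- ===== CLAIM (what is proved, stated in full; the proofs are below) =====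
def Claim_equal_build_inventory_index : Prop := ∀ (rows : List (List (String × String))), Dom_build_inventory_index rows → Pre_build_inventory_index rows → Spec_build_inventory_index rows (build_inventory_index rows)

-- ===== LEMMAS AND PROOFS =====

-- the value-wise image of a grouping dict under pvBest
def pvMapD (g : PySem.Dict (String × String) (List (List (String × String)))) :
    PySem.Dict (String × String) (List (String × String)) :=
  PySem.Dict.mk (g.items.map (fun kg => (kg.1, pvBest kg.2)))

theorem pvBest_singleton (r : List (String × String)) : pvBest [r] = r := by
  unfold pvBest
  cases h : pvIsDocx r <;> simp [List.find?, h]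

theorem pvBest_append (v : List (List (String × String))) (r : List (String × String))
    (hv : v ≠ []) : pvBest (v ++ [r]) = if pvIsDocx r then r else pvBest v := by
  unfold pvBest
  rw [List.reverse_append]
  simp only [List.reverse_cons, List.reverse_nil, List.nil_append, List.singleton_append]
  cases h : pvIsDocx r with
  | true => rw [List.find?_cons_of_pos h]; simp
  | false =>
    rw [List.find?_cons_of_neg (by simp [h])]
    simp only [Bool.false_eq_true, if_false]
    cases hf : v.reverse.find? pvIsDocx with
    | some r' => simp
    | none =>
      cases v with
      | nil => exact absurd rfl hv
      | cons x xs => simp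

theorem pvMapD_get? (g : PySem.Dict (String × String) (List (List (String × String))))
    (k : String × String) : (pvMapD g).get? k = (g.get? k).map pvBest := by
  unfold pvMapD
  obtain ⟨l⟩ := g
  induction l with
  | nil => simp [PySem.Dict.get?]
  | cons p rest ih =>
    obtain ⟨pk, pv⟩ := p
    simp only [List.map_cons, PySem.Dict.get?_mk_cons]
    by_cases h : (pk == k) = true <;> simp [h, ih]

theorem pvMapD_contains (g : PySem.Dict (String × String) (List (List (String × String))))
    (k : String × String) : (pvMapD g).contains k = g.contains k := by
  unfold pvMapD
  obtain ⟨l⟩ := g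
  simp [PySem.Dict.contains_mk, List.any_map, Function.comp_def]

theorem pvMapD_keys (g : PySem.Dict (String × String) (List (List (String × String)))) :
    (pvMapD g).keys = g.keys := by
  unfold pvMapD PySem.Dict.keys
  simp

theorem pvMapD_insert (g : PySem.Dict (String × String) (List (List (String × String))))
    (k : String × String) (v : List (List (String × String))) :
    pvMapD (g.insert k v) = (pvMapD g).insert k (pvBest v) := by
  apply PySem.Dict.ext
  show (pvMapD (g.insert k v)).items = _
  conv_rhs => rw [PySem.Dict.items_insert]
  rw [pvMapD_contains]
  unfold pvMapD
  rw [PySem.Dict.items_insert]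
  by_cases h : g.contains k = true
  · simp only [h, if_true, List.map_map]
    apply List.map_congr_left
    intro p _
    by_cases hpk : (p.1 == k) = true <;> simp [Function.comp, hpk]
  · simp [h]

-- inserting the value a nodup-keyed dict already holds at k is a no-op
theorem pvInsert_noop (d : PySem.Dict (String × String) (List (String × String)))
    (k : String × String) (v : List (String × String))
    (hnd : d.keys.Nodup) (h : d.get? k = some v) : d.insert k v = d := by
  apply PySem.Dict.ext
  have hc : d.contains k = true := by
    rw [PySem.Dict.contains_eq_isSome_get?, h]; rfl
  rw [PySem.Dict.items_insert, if_pos hc]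
  have hmem : (k, v) ∈ d.items := PySem.Dict.mem_items_of_get?_eq_some _ h
  have hinj := List.inj_on_of_nodup_map (f := Prod.fst) (l := d.items) hnd
  have : ∀ p ∈ d.items, (if (p.1 == k) = true then (k, v) else p) = p := by
    intro p hp
    by_cases hpk : (p.1 == k) = true
    · have : p = (k, v) := hinj hp hmem (eq_of_beq hpk)
      rw [this, if_pos]; simp
    · rw [if_neg hpk]
  rw [List.map_congr_left this]; simp

-- the grouping dict's values are never [] and its keys stay unique
theorem pvGroupStep_inv (g : PySem.Dict (String × String) (List (List (String × String))))
    (row : List (String × String))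
    (hnd : g.keys.Nodup) (hg : ∀ k v, g.get? k = some v → v ≠ []) :
    (pvGroupStep g row).keys.Nodup ∧
      (∀ k v, (pvGroupStep g row).get? k = some v → v ≠ []) := by
  unfold pvGroupStep
  by_cases hn : pvIsNoise row = true
  · simp only [hn, if_true]; exact ⟨hnd, hg⟩
  · rw [if_neg hn]
    simp only [PySem.Dict.modify]
    refine ⟨PySem.Dict.nodup_keys_insert _ _ _ hnd, ?_⟩
    intro k v hv
    rw [PySem.Dict.get?_insert] at hv
    by_cases hk : k = pvKey row
    · simp only [hk, if_true, Option.some.injEq] at hv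
      subst hv; simp
    · rw [if_neg hk] at hv
      exact hg k v hv

-- one loop step: A's step on the reduced dict equals the reduction of B's grouping step
theorem pvStep_comm (g : PySem.Dict (String × String) (List (List (String × String))))
    (row : List (String × String))
    (hnd : g.keys.Nodup) (hg : ∀ k v, g.get? k = some v → v ≠ []) :
    pvAStep (pvMapD g) row = pvMapD (pvGroupStep g row) := by
  unfold pvAStep pvGroupStep
  by_cases hn : pvIsNoise row = true
  · simp [hn]
  · rw [if_neg hn, if_neg hn]
    simp only [PySem.Dict.modify]
    rw [pvMapD_insert, pvMapD_get?]
    cases hget : g.get? (pvKey row) with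
    | none =>
      rw [PySem.Dict.getD_of_get?_eq_none _ _ hget]
      simp [pvBest_singleton]
    | some v =>
      rw [PySem.Dict.getD_of_get?_eq_some _ _ hget]
      have hv : v ≠ [] := hg _ _ hget
      rw [pvBest_append v row hv]
      simp only [Option.map_some]
      cases hd : pvIsDocx row with
      | true => simp
      | false =>
        simp only [Bool.false_eq_true, if_false]
        exact (pvInsert_noop _ _ _ (by rw [pvMapD_keys]; exact hnd)
          (by rw [pvMapD_get?, hget]; rfl)).symm

theorem pvFold_comm (rows : List (List (String × String)))
    (g : PySem.Dict (String × String) (List (List (String × String))))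
    (hnd : g.keys.Nodup) (hg : ∀ k v, g.get? k = some v → v ≠ []) :
    rows.foldl pvAStep (pvMapD g) = pvMapD (rows.foldl pvGroupStep g) := by
  induction rows generalizing g with
  | nil => rfl
  | cons r rs ih =>
    simp only [List.foldl_cons]
    rw [pvStep_comm g r hnd hg]
    obtain ⟨h1, h2⟩ := pvGroupStep_inv g r hnd hg
    exact ih _ h1 h2

-- ===== VERDICT (by name: the statement is the Claim_ definition above) =====
theorem build_inventory_index_spec : Claim_equal_build_inventory_index := by
  intro rows _ _
  unfold Spec_build_inventory_index build_inventory_index build_inventory_index_alt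
  have hempty : (PySem.Dict.empty : PySem.Dict (String × String) (List (String × String))) =
      pvMapD PySem.Dict.empty := rfl
  rw [hempty, pvFold_comm rows PySem.Dict.empty (by simp [PySem.Dict.keys, PySem.Dict.empty])
    (by intro k v h; simp [PySem.Dict.get?, PySem.Dict.empty] at h)]
  unfold pvMapD
  simp [List.map_map, Function.comp_def]
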